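-- pv_equiv track=rewrite | github.com/ChahelPaatur/Self-Modifying-Program-Synthesis-via-Online-Library-Evolution | common/ultra_ops.py | make_vertically_symmetric
-- ===== SOURCE A (Python) =====
-- from typing import List, Dict, Tuple, Set
--
-- Grid = List[List[int]]
--
-- def make_vertically_symmetric(grid: Grid) -> Grid:
--     """Make grid vertically symmetric (mirror bottom half)"""
--     if not grid:
--         return grid
--
--     h, w = len(grid), len(grid[0])
--     result = [row[:] for row in grid]
--
--     for r in range(h // 2):
--         result[h - 1 - r] = result[r][:]
--
--     return result
-- ===== SOURCE B (Python) =====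
-- def make_vertically_symmetric(grid):
--     """Make grid vertically symmetric (mirror bottom half)"""
--     if not grid:
--         return grid
--     h = len(grid)
--     top = [row[:] for row in grid[:h - h // 2]]
--     bottom = [row[:] for row in reversed(grid[:h // 2])]
--     return top + bottom
-- ===== Notes on version B (the rewrite author's own statement) =====
-- stated objective: alternative
-- what changed: Instead of copying the whole grid and overwriting the bottom rows in an index loop, B slices the top h-h//2 rows and concatenates them with the reversed first h//2 rows, building the result from two slices with no index arithmetic per row.
import Mathlib
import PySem

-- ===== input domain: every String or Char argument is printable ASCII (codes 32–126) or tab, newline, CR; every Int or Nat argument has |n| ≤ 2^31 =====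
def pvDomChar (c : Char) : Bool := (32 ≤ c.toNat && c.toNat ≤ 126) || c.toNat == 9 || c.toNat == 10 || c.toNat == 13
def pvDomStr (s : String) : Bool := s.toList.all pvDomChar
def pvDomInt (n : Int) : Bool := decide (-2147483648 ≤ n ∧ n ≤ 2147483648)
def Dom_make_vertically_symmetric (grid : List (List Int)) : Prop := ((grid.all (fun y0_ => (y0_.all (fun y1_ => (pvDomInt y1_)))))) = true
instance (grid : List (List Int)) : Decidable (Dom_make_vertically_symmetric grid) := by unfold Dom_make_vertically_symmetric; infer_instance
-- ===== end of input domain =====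

-- B builds the result by concatenating two slices — the top h-h//2 rows and the
-- reversed first h//2 rows — instead of A's copy-everything-then-overwrite index loop.

-- ===== PORT A =====
-- copy-all rows, then for r in range(h//2): result[h-1-r] = result[r][:]
def make_vertically_symmetric (grid : List (List Int)) : List (List Int) :=
  if grid = [] then grid
  else
    let h : Int := grid.length
    (PySem.List.pyRange 0 (PySem.Int.floordiv h 2) 1).foldl
      (fun res r => PySem.List.pySetD res (h - 1 - r) (PySem.List.pyGetD res r []))
      grid

-- ===== PORT B =====
-- top = grid[:h - h//2]; bottom = reversed(grid[:h//2]); return top + bottom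
def make_vertically_symmetric_alt (grid : List (List Int)) : List (List Int) :=
  if grid = [] then grid
  else
    let h : Int := grid.length
    PySem.List.slice grid none (some (h - PySem.Int.floordiv h 2)) ++
      (PySem.List.slice grid none (some (PySem.Int.floordiv h 2))).reverse

-- ===== PRECONDITION & SPEC =====
def Spec_make_vertically_symmetric (grid : List (List Int)) (out : List (List Int)) : Prop := out = make_vertically_symmetric_alt grid
instance (grid : List (List Int)) (out : List (List Int)) : Decidable (Spec_make_vertically_symmetric grid out) := by unfold Spec_make_vertically_symmetric; infer_instance

-- ===== CLAIM (what is proved, stated in full; the proofs are below) =====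
def Claim_equal_make_vertically_symmetric : Prop := ∀ (grid : List (List Int)), Dom_make_vertically_symmetric grid → Spec_make_vertically_symmetric grid (make_vertically_symmetric grid)

-- ===== LEMMAS AND PROOFS =====

-- The shape A's fold reduces to: row i is grid[n-1-i] when n-k ≤ i, else grid[i].
def pvMirror (grid : List (List Int)) (k : Nat) : List (List Int) :=
  (List.range grid.length).map (fun i =>
    if grid.length - k ≤ i then grid.getD (grid.length - 1 - i) [] else grid.getD i [])

theorem pvMirror_length (grid : List (List Int)) (k : Nat) :
    (pvMirror grid k).length = grid.length := by
  simp [pvMirror]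

theorem pvMirror_zero (grid : List (List Int)) : pvMirror grid 0 = grid := by
  apply List.ext_getElem
  · simp [pvMirror]
  · intro i h1 h2
    have hi : i < grid.length := by simpa [pvMirror] using h1
    simp [pvMirror, Nat.not_le.mpr hi, List.getD_eq_getElem?_getD, List.getElem?_eq_getElem hi]

-- One fold step: setting row n-1-k of pvMirror grid k to grid[k] gives pvMirror grid (k+1).
theorem pvMirror_step (grid : List (List Int)) (k : Nat) (hk : k + 1 ≤ grid.length / 2) :
    (pvMirror grid k).set (grid.length - 1 - k) (grid.getD k []) = pvMirror grid (k + 1) := by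
  have hn : 2 * (k + 1) ≤ grid.length := by omega
  apply List.ext_getElem
  · simp [pvMirror]
  · intro i h1 h2
    have hi : i < grid.length := by simpa [pvMirror] using h2
    by_cases hik : i = grid.length - 1 - k
    · subst hik
      have hset : grid.length - 1 - k < (pvMirror grid k).length := by
        rw [pvMirror_length]; omega
      rw [List.getElem_set_self]
      have hcond : grid.length - (k + 1) ≤ grid.length - 1 - k := by omega
      have heq : grid.length - 1 - (grid.length - 1 - k) = k := by omega
      simp only [pvMirror, List.getElem_map, List.getElem_range]
      rw [if_pos hcond, heq]
    · rw [List.getElem_set_ne (by omega)]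
      simp only [pvMirror, List.getElem_map, List.getElem_range]
      by_cases hc : grid.length - k ≤ i
      · rw [if_pos hc, if_pos (by omega)]
      · rw [if_neg hc, if_neg (by omega)]

theorem pvGetD_mirror (grid : List (List Int)) (k j : Nat) (hj : j < grid.length)
    (hjk : j < grid.length - k) :
    PySem.List.pyGetD (pvMirror grid k) (j : Int) [] = grid.getD j [] := by
  have hlen : j < (pvMirror grid k).length := by rw [pvMirror_length]; exact hj
  rw [PySem.List.pyGetD_natCast, List.getD_eq_getElem?_getD, List.getElem?_eq_getElem hlen]
  simp only [pvMirror, List.getElem_map, List.getElem_range]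
  rw [if_neg (Nat.not_le.mpr hjk)]
  rfl

-- The fold over range(k) computes pvMirror grid k, for k ≤ h//2.
theorem pvFold_eq_mirror (grid : List (List Int)) (k : Nat) (hk : k ≤ grid.length / 2) :
    (PySem.List.pyRange 0 (k : Int) 1).foldl
      (fun res r => PySem.List.pySetD res ((grid.length : Int) - 1 - r) (PySem.List.pyGetD res r []))
      grid = pvMirror grid k := by
  induction k with
  | zero => simp [PySem.List.pyRange_one_eq_nil, pvMirror_zero]
  | succ k ih =>
    have hk' : k ≤ grid.length / 2 := by omega
    have hkn : k < grid.length := by omega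
    rw [show ((k + 1 : Nat) : Int) = (k : Int) + 1 by push_cast; ring,
        PySem.List.pyRange_one_succ_right (by positivity), List.foldl_append, ih hk']
    simp only [List.foldl_cons, List.foldl_nil]
    have hget : PySem.List.pyGetD (pvMirror grid k) ((k : Nat) : Int) [] = grid.getD k [] :=
      pvGetD_mirror grid k k hkn (by omega)
    have hidx : (grid.length : Int) - 1 - (k : Nat) = ((grid.length - 1 - k : Nat) : Int) := by
      omega
    rw [hget, hidx, PySem.List.pySetD_natCast, pvMirror_step grid k hk]

-- B's two-slice concatenation equals pvMirror grid (h//2).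
theorem pvAlt_eq_mirror (grid : List (List Int)) (hne : grid ≠ []) :
    make_vertically_symmetric_alt grid = pvMirror grid (grid.length / 2) := by
  unfold make_vertically_symmetric_alt
  rw [if_neg hne]
  have hfd : PySem.Int.floordiv (grid.length : Int) 2 = ((grid.length / 2 : Nat) : Int) := by
    exact_mod_cast PySem.Int.floordiv_natCast grid.length 2
  simp only [hfd]
  have hsub : (grid.length : Int) - ((grid.length / 2 : Nat) : Int)
      = ((grid.length - grid.length / 2 : Nat) : Int) := by
    have := Nat.div_le_self grid.length 2
    omega
  rw [hsub, PySem.List.slice_to_natCast, PySem.List.slice_to_natCast]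
  set n := grid.length with hn
  set k := n / 2 with hkdef
  have hk : k ≤ n := Nat.div_le_self n 2
  apply List.ext_getElem
  · simp only [pvMirror_length, List.length_append, List.length_take, List.length_reverse]
    omega
  · intro i h1 h2
    have hi : i < n := by
      simpa only [pvMirror_length] using h2
    have htlen : (grid.take (n - k)).length = n - k := by
      rw [List.length_take]; omega
    simp only [pvMirror, List.getElem_map, List.getElem_range]
    by_cases hc : n - k ≤ i
    · rw [if_pos hc, List.getElem_append_right (by omega), List.getElem_reverse,
          List.getElem_take, List.getD_eq_getElem?_getD,
          List.getElem?_eq_getElem (show grid.length - 1 - i < grid.length by omega)]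
      simp only [Option.getD_some]
      congr 1
      simp only [List.length_take]
      omega
    · rw [List.getElem_append_left (by omega), List.getElem_take]
      rw [if_neg hc, List.getD_eq_getElem?_getD, List.getElem?_eq_getElem hi]
      rfl

-- ===== VERDICT (by name: the statement is the Claim_ definition above) =====
theorem make_vertically_symmetric_spec : Claim_equal_make_vertically_symmetric := by
  intro grid _
  unfold Spec_make_vertically_symmetric
  by_cases hne : grid = []
  · subst hne; rfl
  · unfold make_vertically_symmetric
    rw [if_neg hne]
    have hfd : PySem.Int.floordiv (grid.length : Int) 2 = ((grid.length / 2 : Nat) : Int) := by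
      exact_mod_cast PySem.Int.floordiv_natCast grid.length 2
    simp only [hfd]
    rw [pvFold_eq_mirror grid (grid.length / 2) le_rfl, pvAlt_eq_mirror grid hne]
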